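-- pv_equiv track=rewrite | github.com/SeyoungKo/Algorithm-ProblemSolving | binarysearch/make_ricecake.py | maker
-- ===== SOURCE A (Python) =====
-- def maker(inputs, m, start, end):
--     if start > end:
--         return None
--
--     mid = (start + end) // 2
--     share = 0
--
--     for item in inputs:
--         if item > mid:
--             share += item - mid
--
--     if share == m:
--         return mid
--
--     elif share < m:
--         return maker(inputs, m, start, mid-1)
--
--     elif share > m:
--         return maker(inputs, m, mid + 1, end)
-- ===== SOURCE B (Python) =====
-- def maker(inputs, m, start, end):
--     # Alternative strategy: sort once + prefix sums; each probe's "share" is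
--     # computed by binary search over the sorted array instead of a scan of inputs.
--     xs = sorted(inputs)
--     n = len(xs)
--     pref = [0]
--     for x in xs:
--         pref.append(pref[-1] + x)
--     total = pref[n]
--     while start <= end:
--         mid = (start + end) // 2
--         # first index whose element exceeds mid
--         lo, hi = 0, n
--         while lo < hi:
--             j = (lo + hi) // 2
--             if xs[j] > mid:
--                 hi = j
--             else:
--                 lo = j + 1
--         share = (total - pref[lo]) - (n - lo) * mid
--         if share == m:
--             return mid
--         if share < m:
--             end = mid - 1
--         else:
--             start = mid + 1
--     return None
-- ===== Notes on version B (the rewrite author's own statement) =====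
-- stated objective: alternative
-- what changed: Replaces the O(n) rescan of inputs at every binary-search probe by a one-time sort + prefix sums, computing each probe's excess via an inner binary search, and turns the recursion into an iterative loop.
import Mathlib
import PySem

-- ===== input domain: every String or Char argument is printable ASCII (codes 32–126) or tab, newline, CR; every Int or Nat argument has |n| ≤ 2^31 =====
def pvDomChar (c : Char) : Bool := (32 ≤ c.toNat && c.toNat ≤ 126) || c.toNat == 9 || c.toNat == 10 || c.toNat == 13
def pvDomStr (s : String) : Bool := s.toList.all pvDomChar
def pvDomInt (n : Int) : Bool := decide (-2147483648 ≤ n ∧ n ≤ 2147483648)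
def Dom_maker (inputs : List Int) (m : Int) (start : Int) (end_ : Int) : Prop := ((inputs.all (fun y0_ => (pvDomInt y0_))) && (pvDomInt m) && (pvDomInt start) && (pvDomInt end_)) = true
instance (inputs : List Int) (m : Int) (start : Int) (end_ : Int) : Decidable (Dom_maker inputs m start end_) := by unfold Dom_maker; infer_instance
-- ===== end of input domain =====

-- B replaces A's per-probe rescan of inputs by a one-time sort + prefix sums with an
-- inner binary search per probe, and turns the recursion into a loop (objective: alternative).

-- ===== PORT A =====
-- A's recursion, made total with a fuel bound ≥ the recursion depth (the interval
-- [start, end_] shrinks strictly each call); fuel 0 is reached only when start > end_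
def makerGo : Nat → List Int → Int → Int → Int → Option Int
  | 0, _, _, _, _ => none
  | fuel + 1, inputs, m, start, end_ =>
      if start > end_ then none
      else
        let mid := PySem.Int.floordiv (start + end_) 2
        let share := inputs.foldl (fun s item => if item > mid then s + (item - mid) else s) 0
        if share = m then some mid
        else if share < m then makerGo fuel inputs m start (mid - 1)
        else makerGo fuel inputs m (mid + 1) end_

def maker (inputs : List Int) (m : Int) (start : Int) (end_ : Int) : Option Int :=
  makerGo (end_ - start + 1).toNat inputs m start end_

-- ===== PORT B =====
-- inner loop 'while lo < hi' of Source B: lo, hi are nonnegative Python ints, ported as Nat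
-- ((lo+hi)//2 = Nat division); fuel = hi - lo bounds the iteration count (the gap halves);
-- xs[j] is always in range here, ported with pyGetD
def bsearchGo (xs : List Int) (mid : Int) : Nat → Nat → Nat → Nat
  | 0, lo, _ => lo
  | fuel + 1, lo, hi =>
      if lo < hi then
        let j := (lo + hi) / 2
        if PySem.List.pyGetD xs (j : Int) 0 > mid then bsearchGo xs mid fuel lo j
        else bsearchGo xs mid fuel (j + 1) hi
      else lo

def bsearchGt (xs : List Int) (mid : Int) (lo hi : Nat) : Nat :=
  bsearchGo xs mid (hi - lo) lo hi

-- outer 'while start <= end' loop of Source B, same fuel bound as A's recursion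
def makerLoopGo (xs : List Int) (total : Int) (pref : List Int) (n : Nat) :
    Nat → Int → Int → Int → Option Int
  | 0, _, _, _ => none
  | fuel + 1, m, start, end_ =>
      if start ≤ end_ then
        let mid := PySem.Int.floordiv (start + end_) 2
        let lo := bsearchGt xs mid 0 n
        let share := (total - PySem.List.pyGetD pref (lo : Int) 0) - ((n : Int) - (lo : Int)) * mid
        if share = m then some mid
        else if share < m then makerLoopGo xs total pref n fuel m start (mid - 1)
        else makerLoopGo xs total pref n fuel m (mid + 1) end_
      else none

def maker_alt (inputs : List Int) (m : Int) (start : Int) (end_ : Int) : Option Int :=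
  let xs := PySem.List.sorted inputs (fun x => x) false
  let n := xs.length
  let pref := xs.foldl (fun p x => p ++ [PySem.List.pyGetD p (-1) 0 + x]) [0]
  let total := PySem.List.pyGetD pref (n : Int) 0
  makerLoopGo xs total pref n (end_ - start + 1).toNat m start end_

-- ===== PRECONDITION & SPEC =====
def Spec_maker (inputs : List Int) (m : Int) (start : Int) (end_ : Int) (out : Option Int) : Prop := out = maker_alt inputs m start end_
instance (inputs : List Int) (m : Int) (start : Int) (end_ : Int) (out : Option Int) : Decidable (Spec_maker inputs m start end_ out) := by unfold Spec_maker; infer_instance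

-- ===== CLAIM (what is proved, stated in full; the proofs are below) =====
def Claim_equal_maker : Prop := ∀ (inputs : List Int) (m : Int) (start : Int) (end_ : Int), Dom_maker inputs m start end_ → Spec_maker inputs m start end_ (maker inputs m start end_)

-- ===== LEMMAS AND PROOFS =====

-- running prefix sums of xs, entered with running value s
def scanFrom (s : Int) : List Int → List Int
  | [] => []
  | x :: t => (s + x) :: scanFrom (s + x) t

-- the prefix-sum building loop of Source B produces the running sums
theorem prefFold (xs : List Int) : ∀ (acc : List Int) (s : Int),
    xs.foldl (fun p x => p ++ [PySem.List.pyGetD p (-1) 0 + x]) (acc ++ [s])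
      = acc ++ s :: scanFrom s xs := by
  induction xs with
  | nil => intro acc s; simp [scanFrom]
  | cons x t ih =>
      intro acc s
      simp only [List.foldl_cons, PySem.List.pyGetD_neg_one_append_singleton]
      have := ih (acc ++ [s]) (s + x)
      simpa [scanFrom] using this

theorem getD_scanFrom (xs : List Int) : ∀ (s : Int) (k : Nat), k ≤ xs.length →
    (s :: scanFrom s xs).getD k 0 = s + (xs.take k).sum := by
  induction xs with
  | nil =>
      intro s k hk
      have : k = 0 := by simpa using hk
      subst this; simp
  | cons x t ih =>
      intro s k hk
      cases k with
      | zero => simp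
      | succ k =>
          have hih := ih (s + x) k (by simpa using hk)
          show ((s + x) :: scanFrom (s + x) t).getD (k + 1 - 1) 0 = _
          rw [show k + 1 - 1 = k from rfl, hih, List.take_succ_cons, List.sum_cons]
          ring

-- binary search: the result r splits xs into a prefix ≤ mid and a suffix > mid
theorem bsearchGo_spec (xs : List Int) (mid : Int)
    (hmono : ∀ p q : Nat, p ≤ q → q < xs.length → xs.getD p 0 ≤ xs.getD q 0) :
    ∀ (k lo hi : Nat), hi - lo ≤ k → lo ≤ hi → hi ≤ xs.length →
    (∀ j, j < lo → xs.getD j 0 ≤ mid) →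
    (∀ j, hi ≤ j → j < xs.length → mid < xs.getD j 0) →
    lo ≤ bsearchGo xs mid k lo hi ∧ bsearchGo xs mid k lo hi ≤ hi ∧
    (∀ j, j < bsearchGo xs mid k lo hi → xs.getD j 0 ≤ mid) ∧
    (∀ j, bsearchGo xs mid k lo hi ≤ j → j < xs.length → mid < xs.getD j 0) := by
  intro k
  induction k with
  | zero =>
      intro lo hi hk hle hhi hlow hhigh
      have h : lo = hi := by omega
      subst h
      exact ⟨le_refl _, le_refl _, hlow, hhigh⟩
  | succ k ih =>
      intro lo hi hk hle hhi hlow hhigh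
      rw [bsearchGo]
      by_cases hlt : lo < hi
      · simp only [hlt, if_true]
        have hjlo : lo ≤ (lo + hi) / 2 := by omega
        have hjhi : (lo + hi) / 2 < hi := by omega
        have hjn : (lo + hi) / 2 < xs.length := by omega
        rw [PySem.List.pyGetD_natCast]
        by_cases hg : xs.getD ((lo + hi) / 2) 0 > mid
        · simp only [hg, if_true]
          obtain ⟨a1, a2, a3, a4⟩ := ih lo ((lo + hi) / 2) (by omega) hjlo (by omega) hlow
            (fun j' hj' hj'n => lt_of_lt_of_le hg (hmono _ j' hj' hj'n))
          exact ⟨a1, a2.trans (by omega), a3, a4⟩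
        · simp only [hg, if_false]
          have hres := ih ((lo + hi) / 2 + 1) hi (by omega) (by omega) hhi ?_ hhigh
          · exact ⟨by omega, hres.2.1, hres.2.2.1, hres.2.2.2⟩
          · intro j' hj'
            have h1 : xs.getD j' 0 ≤ xs.getD ((lo + hi) / 2) 0 := hmono j' _ (by omega) hjn
            omega
      · simp only [hlt, if_false]
        have h : lo = hi := by omega
        subst h
        exact ⟨le_refl _, le_refl _, hlow, hhigh⟩

theorem sum_map_sub (l : List Int) (c : Int) :
    (l.map (fun x => x - c)).sum = l.sum - l.length * c := by
  induction l with
  | nil => simp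
  | cons x t ih => simp [ih]; ring

theorem foldlA (mid : Int) (l : List Int) : ∀ (s : Int),
    l.foldl (fun s item => if item > mid then s + (item - mid) else s) s
      = s + (l.map (fun x => if x > mid then x - mid else 0)).sum := by
  induction l with
  | nil => intro s; simp
  | cons x t ih =>
      intro s
      simp only [List.foldl_cons, List.map_cons, List.sum_cons]
      by_cases h : x > mid
      · simp [h, ih]; ring
      · simp [h, ih]

-- the two probe computations agree: B's prefix-sum/binary-search share equals A's scanned share
theorem share_eq (inputs : List Int) (mid : Int) :
    (PySem.List.pyGetD
        ((PySem.List.sorted inputs (fun x => x) false).foldl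
          (fun p x => p ++ [PySem.List.pyGetD p (-1) 0 + x]) [0])
        (((PySem.List.sorted inputs (fun x => x) false).length : Nat) : Int) 0
      - PySem.List.pyGetD
        ((PySem.List.sorted inputs (fun x => x) false).foldl
          (fun p x => p ++ [PySem.List.pyGetD p (-1) 0 + x]) [0])
        ((bsearchGt (PySem.List.sorted inputs (fun x => x) false) mid 0
            (PySem.List.sorted inputs (fun x => x) false).length : Nat) : Int) 0)
      - (((PySem.List.sorted inputs (fun x => x) false).length : Int)
          - (bsearchGt (PySem.List.sorted inputs (fun x => x) false) mid 0
            (PySem.List.sorted inputs (fun x => x) false).length : Int)) * mid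
    = (inputs.map (fun x => if x > mid then x - mid else 0)).sum := by
  set xs := PySem.List.sorted inputs (fun x => x) false with hxs
  set n := xs.length with hn
  set r := bsearchGt xs mid 0 n with hr
  have hmono : ∀ p q : Nat, p ≤ q → q < xs.length → xs.getD p 0 ≤ xs.getD q 0 := by
    intro p q hpq hq
    rw [List.getD_eq_getElem _ _ (by omega), List.getD_eq_getElem _ _ hq]
    exact PySem.List.sorted_id_getElem_mono inputs hpq hq
  obtain ⟨-, hrn, hbelow, habove⟩ :=
    bsearchGo_spec xs mid hmono (n - 0) 0 n (by omega) (by omega) (le_refl _)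
      (by intro j hj; omega) (by intro j h1 h2; omega)
  rw [show bsearchGo xs mid (n - 0) 0 n = r from rfl] at hrn hbelow habove
  have hpref : xs.foldl (fun p x => p ++ [PySem.List.pyGetD p (-1) 0 + x]) [0]
      = (0 : Int) :: scanFrom 0 xs := by
    simpa using prefFold xs [] 0
  rw [hpref, PySem.List.pyGetD_natCast, PySem.List.pyGetD_natCast,
      getD_scanFrom xs 0 n (le_refl _), getD_scanFrom xs 0 r hrn,
      List.take_of_length_le (le_refl _)]
  have htake : ∀ x ∈ xs.take r, x ≤ mid := by
    intro x hx
    obtain ⟨i, hi, hix⟩ := List.getElem_of_mem hx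
    have hi' : i < r := by simp [List.length_take] at hi; omega
    have hgd : xs.getD i 0 = x := by
      rw [List.getD_eq_getElem _ _ (by omega)]
      rw [← hix, List.getElem_take]
    have := hbelow i hi'
    omega
  have hdrop : ∀ x ∈ xs.drop r, mid < x := by
    intro x hx
    obtain ⟨i, hi, hix⟩ := List.getElem_of_mem hx
    have hlen : i < xs.length - r := by simpa [List.length_drop] using hi
    have hgd : xs.getD (r + i) 0 = x := by
      rw [List.getD_eq_getElem _ _ (by omega)]
      rw [← hix, List.getElem_drop]
    have := habove (r + i) (by omega) (by omega)
    omega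
  have hperm : (xs.map (fun x => if x > mid then x - mid else 0)).sum
      = (inputs.map (fun x => if x > mid then x - mid else 0)).sum :=
    ((PySem.List.sorted_perm inputs (fun x => x) false).map _).sum_eq
  rw [← hperm]
  conv_rhs => rw [← List.take_append_drop r xs]
  rw [List.map_append, List.sum_append]
  have h1 : ((xs.take r).map (fun x => if x > mid then x - mid else 0)).sum = 0 := by
    apply List.sum_eq_zero
    intro y hy
    obtain ⟨x, hx, hxy⟩ := List.mem_map.mp hy
    have := htake x hx
    rw [← hxy, if_neg (by omega)]
  have h2 : ((xs.drop r).map (fun x => if x > mid then x - mid else 0))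
      = (xs.drop r).map (fun x => x - mid) := by
    apply List.map_congr_left
    intro x hx
    rw [if_pos (hdrop x hx)]
  have hsplit : (xs.take r).sum + (xs.drop r).sum = xs.sum := by
    rw [← List.sum_append, List.take_append_drop]
  have hdlen : (xs.drop r).length = n - r := by rw [List.length_drop]
  rw [h1, h2, sum_map_sub, hdlen]
  have : ((n - r : Nat) : Int) = (n : Int) - (r : Int) := by omega
  rw [this]
  omega

-- the outer loops agree step by step, given that the probe computations agree
theorem loop_eq (inputs : List Int) (m : Int) (xs pref : List Int) (total : Int) (n : Nat)
    (hshare : ∀ mid : Int,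
      (total - PySem.List.pyGetD pref ((bsearchGt xs mid 0 n : Nat) : Int) 0)
          - ((n : Int) - (bsearchGt xs mid 0 n : Int)) * mid
        = (inputs.map (fun x => if x > mid then x - mid else 0)).sum) :
    ∀ (fuel : Nat) (start end_ : Int),
      makerGo fuel inputs m start end_ = makerLoopGo xs total pref n fuel m start end_ := by
  intro fuel
  induction fuel with
  | zero => intro start end_; rfl
  | succ k ih =>
      intro start end_
      rw [makerGo, makerLoopGo]
      by_cases h : start ≤ end_
      · rw [if_neg (show ¬ start > end_ by omega), if_pos h]
        have hA := foldlA (PySem.Int.floordiv (start + end_) 2) inputs 0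
        simp only []
        rw [hA, zero_add, ← hshare (PySem.Int.floordiv (start + end_) 2)]
        split_ifs with h1 h2
        · rfl
        · exact ih start (PySem.Int.floordiv (start + end_) 2 - 1)
        · exact ih (PySem.Int.floordiv (start + end_) 2 + 1) end_
      · rw [if_pos (show start > end_ by omega), if_neg h]

-- ===== VERDICT (by name: the statement is the Claim_ definition above) =====
theorem maker_spec : Claim_equal_maker := by
  intro inputs m start end_ _
  show maker inputs m start end_ = maker_alt inputs m start end_
  exact loop_eq inputs m _ _ _ _ (fun mid => share_eq inputs mid)
    ((end_ - start + 1).toNat) start end_
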